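-- pv_equiv track=rewrite | github.com/benbc/recovery | pipeline/stage4b_merge.py | build_merge_map
-- ===== SOURCE A (Python) =====
-- def build_merge_map(pairs: list[tuple[int, int, int]]) -> dict[int, int]:
--     """
--     Build a map of group_id -> target_group_id using union-find.
--
--     Handles transitive merges: if A merges with B and B merges with C,
--     all three end up with the same target.
--     """
--     parent = {}
--
--     def find(x):
--         if x not in parent:
--             parent[x] = x
--         if parent[x] != x:
--             parent[x] = find(parent[x])
--         return parent[x]
--
--     def union(x, y):
--         px, py = find(x), find(y)
--         if px != py:
--             # Keep the smaller group_id as canonical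
--             if px < py:
--                 parent[py] = px
--             else:
--                 parent[px] = py
--
--     for g1, g2, _ in pairs:
--         union(g1, g2)
--
--     # Build final map of groups that need updating
--     groups_to_update = {}
--     for g1, g2, _ in pairs:
--         target1 = find(g1)
--         target2 = find(g2)
--         if g1 != target1:
--             groups_to_update[g1] = target1
--         if g2 != target2:
--             groups_to_update[g2] = target2
--
--     return groups_to_update
-- ===== SOURCE B (Python) =====
-- def build_merge_map(pairs):
--     # Flat label map: label[g] is the canonical (smallest) id of g's group so far.
--     label = {}
--     for g1, g2, _ in pairs:
--         r1 = label.get(g1, g1)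
--         r2 = label.get(g2, g2)
--         label.setdefault(g1, r1)
--         label.setdefault(g2, r2)
--         if r1 != r2:
--             lo, hi = (r1, r2) if r1 < r2 else (r2, r1)
--             label = {k: (lo if v == hi else v) for k, v in label.items()}
--     out = {}
--     for g1, g2, _ in pairs:
--         r1 = label.get(g1, g1)
--         r2 = label.get(g2, g2)
--         if g1 != r1:
--             out[g1] = r1
--         if g2 != r2:
--             out[g2] = r2
--     return out
-- ===== Notes on version B (the rewrite author's own statement) =====
-- stated objective: simpler
-- what changed: Replaced the recursive path-compressing union-find forest by a flat label map (node -> current group minimum) that is globally relabelled on each union, so no recursion, no find and no parent forest remain.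
import Mathlib
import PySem

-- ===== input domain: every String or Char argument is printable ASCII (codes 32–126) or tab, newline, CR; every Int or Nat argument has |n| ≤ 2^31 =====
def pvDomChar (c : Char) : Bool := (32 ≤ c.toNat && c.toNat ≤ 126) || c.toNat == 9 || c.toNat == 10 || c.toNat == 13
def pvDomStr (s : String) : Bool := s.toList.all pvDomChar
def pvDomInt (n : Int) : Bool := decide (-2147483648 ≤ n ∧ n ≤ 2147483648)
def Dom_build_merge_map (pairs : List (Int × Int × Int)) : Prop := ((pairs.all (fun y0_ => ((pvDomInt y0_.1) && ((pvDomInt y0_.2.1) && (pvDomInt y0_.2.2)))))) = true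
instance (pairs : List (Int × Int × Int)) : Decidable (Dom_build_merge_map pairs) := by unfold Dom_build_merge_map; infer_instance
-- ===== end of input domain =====

-- B replaces A's recursive path-compressing union-find by a flat node→group-minimum label map
-- relabelled on each union: shorter and non-recursive (objective: simpler; not faster).

-- ===== PORT A =====
-- A's recursive `find` with path compression; the Nat fuel is only a totality guard
-- (under the invariant parent[x] ≤ x the parent chain strictly decreases, so fuel = size+1 suffices).
def findA : Nat → PySem.Dict Int Int → Int → Int × PySem.Dict Int Int
  | 0, d, x => (x, d)      -- unreachable under the invariant (fuel guard only)
  | f + 1, d, x =>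
    -- if x not in parent: parent[x] = x
    let d := if d.contains x then d else d.insert x x
    let px := d.getD x x
    if px ≠ x then
      -- parent[x] = find(parent[x]); return parent[x]
      let rd := findA f d px
      let d2 := rd.2.insert x rd.1
      (d2.getD x x, d2)
    else
      (d.getD x x, d)

def unionA (d : PySem.Dict Int Int) (x y : Int) : PySem.Dict Int Int :=
  let fx := findA (d.size + 1) d x
  let fy := findA (fx.2.size + 1) fx.2 y
  let px := fx.1
  let py := fy.1
  let d := fy.2
  if px ≠ py then (if px < py then d.insert py px else d.insert px py) else d

-- one iteration of A's second loop: state = (groups_to_update, parent)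
def stepA2 (s : PySem.Dict Int Int × PySem.Dict Int Int) (p : Int × Int × Int) :
    PySem.Dict Int Int × PySem.Dict Int Int :=
  let f1 := findA (s.2.size + 1) s.2 p.1
  let f2 := findA (f1.2.size + 1) f1.2 p.2.1
  let out := if p.1 ≠ f1.1 then s.1.insert p.1 f1.1 else s.1
  let out := if p.2.1 ≠ f2.1 then out.insert p.2.1 f2.1 else out
  (out, f2.2)

def build_merge_map (pairs : List (Int × Int × Int)) : List (Int × Int) :=
  let parent := pairs.foldl (fun d p => unionA d p.1 p.2.1) PySem.Dict.empty
  let st := pairs.foldl stepA2 (PySem.Dict.empty, parent)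
  st.1.items

-- ===== PORT B =====
-- dict comprehension {k: (lo if v == hi else v) for k, v in label.items()}
def relabelB (lo hi : Int) (r : PySem.Dict Int Int) : PySem.Dict Int Int :=
  PySem.Dict.mk (r.items.map (fun p => if p.2 = hi then (p.1, lo) else p))

-- one iteration of B's first loop
def stepB (r : PySem.Dict Int Int) (p : Int × Int × Int) : PySem.Dict Int Int :=
  let r1 := r.getD p.1 p.1
  let r2 := r.getD p.2.1 p.2.1
  let r := (r.setdefault p.1 r1).setdefault p.2.1 r2
  if r1 ≠ r2 then
    let lo := if r1 < r2 then r1 else r2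
    let hi := if r1 < r2 then r2 else r1
    relabelB lo hi r
  else r

-- one iteration of B's second loop, reading the finished label map
def outStepB (label : PySem.Dict Int Int) (out : PySem.Dict Int Int) (p : Int × Int × Int) :
    PySem.Dict Int Int :=
  let r1 := label.getD p.1 p.1
  let r2 := label.getD p.2.1 p.2.1
  let out := if p.1 ≠ r1 then out.insert p.1 r1 else out
  if p.2.1 ≠ r2 then out.insert p.2.1 r2 else out

def build_merge_map_alt (pairs : List (Int × Int × Int)) : List (Int × Int) :=
  let label := pairs.foldl stepB PySem.Dict.empty
  let out := pairs.foldl (outStepB label) PySem.Dict.empty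
  out.items

-- ===== PRECONDITION & SPEC =====
def Spec_build_merge_map (pairs : List (Int × Int × Int)) (out : List (Int × Int)) : Prop := out = build_merge_map_alt pairs
instance (pairs : List (Int × Int × Int)) (out : List (Int × Int)) : Decidable (Spec_build_merge_map pairs out) := by unfold Spec_build_merge_map; infer_instance

-- ===== CLAIM (what is proved, stated in full; the proofs are below) =====
def Claim_equal_build_merge_map : Prop := ∀ (pairs : List (Int × Int × Int)), Dom_build_merge_map pairs → Spec_build_merge_map pairs (build_merge_map pairs)

-- ===== LEMMAS AND PROOFS =====

-- mathematical root of x in the parent forest (fuel-indexed chase; stabilises under pvInv)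
def pvChase : Nat → PySem.Dict Int Int → Int → Int
  | 0, _, x => x
  | f + 1, d, x =>
    match d.get? x with
    | some p => if p = x then x else pvChase f d p
    | none => x

def pvRoot (d : PySem.Dict Int Int) (x : Int) : Int := pvChase (d.size + 1) d x

-- termination measure: number of stored keys strictly below x
def pvM (d : PySem.Dict Int Int) (x : Int) : Nat := (d.items.filter (fun q => q.1 < x)).length

-- invariant of A's parent dict: keys unique, parent[x] ≤ x, parents are keys
def pvInv (d : PySem.Dict Int Int) : Prop :=
  d.keys.Nodup ∧ ∀ q ∈ d.items, q.2 ≤ q.1 ∧ d.contains q.2 = true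

theorem pvContains_of_get?_eq_some (d : PySem.Dict Int Int) {k : Int} {v : Int}
    (h : d.get? k = some v) : d.contains k = true := by
  cases hc : d.contains k with
  | true => rfl
  | false => rw [(PySem.Dict.get?_eq_none_iff_contains d k).mpr hc] at h; cases h

theorem pvInv_get?_le {d : PySem.Dict Int Int} {x p : Int} (hInv : pvInv d)
    (h : d.get? x = some p) : p ≤ x ∧ d.contains p = true :=
  hInv.2 _ (PySem.Dict.mem_items_of_get?_eq_some d h)

theorem pvM_le_size (d : PySem.Dict Int Int) (x : Int) : pvM d x ≤ d.size := by
  simpa [pvM, PySem.Dict.size] using List.length_filter_le _ d.items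

theorem pvM_lt {d : PySem.Dict Int Int} {x p : Int} (hInv : pvInv d)
    (hx : d.get? x = some p) (hne : p ≠ x) : pvM d p < pvM d x := by
  obtain ⟨hle, hcp⟩ := pvInv_get?_le hInv hx
  have hplt : p < x := lt_of_le_of_ne hle hne
  obtain ⟨v, hv⟩ : ∃ v, d.get? p = some v := by
    cases hg : d.get? p with
    | none => rw [(PySem.Dict.get?_eq_none_iff_contains d p).mp hg] at hcp; cases hcp
    | some v => exact ⟨v, rfl⟩
  have hmem : (p, v) ∈ d.items := PySem.Dict.mem_items_of_get?_eq_some d hv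
  have heq : d.items.filter (fun q => q.1 < p)
      = (d.items.filter (fun q => q.1 < x)).filter (fun q => q.1 < p) := by
    rw [List.filter_filter]
    apply List.filter_congr
    intro a _
    by_cases h : a.1 < p
    · simp [h, lt_trans h hplt]
    · simp [h]
  rw [pvM, pvM, heq]
  apply List.length_filter_lt_length_iff_exists.mpr
  exact ⟨(p, v), List.mem_filter.mpr ⟨hmem, by simp [hplt]⟩, by simp⟩

theorem pvChase_congr {d : PySem.Dict Int Int} (hInv : pvInv d) :
    ∀ (f g : Nat) (x : Int), pvM d x < f → pvM d x < g → pvChase f d x = pvChase g d x := by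
  intro f
  induction f with
  | zero => intro g x h; omega
  | succ f IH =>
    intro g x hf hg
    obtain ⟨g', rfl⟩ : ∃ g', g = g' + 1 := by cases g with | zero => omega | succ g' => exact ⟨g', rfl⟩
    simp only [pvChase]
    cases hx : d.get? x with
    | none => rfl
    | some p =>
      by_cases hp : p = x
      · simp [hp]
      · simp only [if_neg hp]
        have hlt := pvM_lt hInv hx hp
        exact IH g' p (by omega) (by omega)

theorem pvRoot_none {d : PySem.Dict Int Int} {x : Int} (hx : d.get? x = none) :
    pvRoot d x = x := by
  simp [pvRoot, pvChase, hx]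

theorem pvRoot_self {d : PySem.Dict Int Int} {x : Int} (hx : d.get? x = some x) :
    pvRoot d x = x := by
  simp [pvRoot, pvChase, hx]

theorem pvRoot_not_contains {d : PySem.Dict Int Int} {x : Int} (hc : d.contains x = false) :
    pvRoot d x = x :=
  pvRoot_none ((PySem.Dict.get?_eq_none_iff_contains d x).mpr hc)

theorem pvRoot_ne {d : PySem.Dict Int Int} {x p : Int} (hInv : pvInv d)
    (hx : d.get? x = some p) (hne : p ≠ x) : pvRoot d x = pvRoot d p := by
  have hlt := pvM_lt hInv hx hne
  have hle := pvM_le_size d x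
  show pvChase (d.size + 1) d x = pvChase (d.size + 1) d p
  conv_lhs => rw [pvChase]
  simp only [hx, if_neg hne]
  exact pvChase_congr hInv _ _ p (by omega) (by omega)

theorem pvRoot_le {d : PySem.Dict Int Int} (hInv : pvInv d) : ∀ x, pvRoot d x ≤ x := by
  intro x
  generalize hm : pvM d x = n
  induction n using Nat.strong_induction_on generalizing x with
  | _ n IH =>
    cases hx : d.get? x with
    | none => simp [pvRoot_none hx]
    | some p =>
      by_cases hp : p = x
      · simp [pvRoot_self (hp ▸ hx)]
      · rw [pvRoot_ne hInv hx hp]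
        have hlt := pvM_lt hInv hx hp
        exact le_trans (IH _ (hm ▸ hlt) p rfl) (pvInv_get?_le hInv hx).1

theorem pvRoot_root {d : PySem.Dict Int Int} (hInv : pvInv d) :
    ∀ x, d.contains x = true → d.get? (pvRoot d x) = some (pvRoot d x) := by
  intro x
  generalize hm : pvM d x = n
  induction n using Nat.strong_induction_on generalizing x with
  | _ n IH =>
    intro hc
    cases hx : d.get? x with
    | none => rw [(PySem.Dict.get?_eq_none_iff_contains d x).mp hx] at hc; cases hc
    | some p =>
      by_cases hp : p = x
      · rw [pvRoot_self (hp ▸ hx)]; exact hp ▸ hx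
      · rw [pvRoot_ne hInv hx hp]
        have hlt := pvM_lt hInv hx hp
        exact IH _ (hm ▸ hlt) p rfl (pvInv_get?_le hInv hx).2

theorem pvRoot_idem {d : PySem.Dict Int Int} (hInv : pvInv d) (x : Int) :
    pvRoot d (pvRoot d x) = pvRoot d x := by
  cases hc : d.contains x with
  | true => exact pvRoot_self (pvRoot_root hInv x hc)
  | false =>
    have hx := (PySem.Dict.get?_eq_none_iff_contains d x).mpr hc
    rw [pvRoot_none hx, pvRoot_none hx]

theorem pvRoot_contains_or_eq {d : PySem.Dict Int Int} (hInv : pvInv d) (w : Int) :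
    d.contains (pvRoot d w) = true ∨ pvRoot d w = w := by
  cases hw : d.contains w with
  | true => exact Or.inl (pvContains_of_get?_eq_some d (pvRoot_root hInv w hw))
  | false => exact Or.inr (pvRoot_not_contains hw)

theorem pvInv_empty : pvInv PySem.Dict.empty := by
  constructor
  · exact PySem.Dict.nodup_keys_empty
  · intro q hq
    simp [PySem.Dict.empty] at hq

theorem pvInv_insert {d : PySem.Dict Int Int} {k w : Int} (hInv : pvInv d)
    (hw : w ≤ k) (hcw : d.contains w = true ∨ w = k) : pvInv (d.insert k w) := by
  refine ⟨PySem.Dict.nodup_keys_insert d k w hInv.1, ?_⟩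
  have hcw' : (d.insert k w).contains w = true := by
    rw [PySem.Dict.contains_insert]
    rcases hcw with h | h
    · simp [h]
    · simp [h]
  intro q hq
  rw [PySem.Dict.items_insert] at hq
  by_cases hc : d.contains k = true
  · rw [if_pos hc] at hq
    obtain ⟨q', hq', hfq⟩ := List.mem_map.mp hq
    by_cases hk : (q'.1 == k) = true
    · rw [if_pos hk] at hfq
      subst hfq
      exact ⟨hw, hcw'⟩
    · rw [if_neg hk] at hfq
      subst hfq
      obtain ⟨h1, h2⟩ := hInv.2 q' hq'
      refine ⟨h1, ?_⟩
      rw [PySem.Dict.contains_insert]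
      simp [h2]
  · rw [if_neg hc] at hq
    rcases List.mem_append.mp hq with h | h
    · obtain ⟨h1, h2⟩ := hInv.2 q h
      refine ⟨h1, ?_⟩
      rw [PySem.Dict.contains_insert]
      simp [h2]
    · simp only [List.mem_singleton] at h
      subst h
      exact ⟨hw, hcw'⟩

theorem pvRoot_insert_fresh {d : PySem.Dict Int Int} {x : Int} (hInv : pvInv d)
    (hc : d.contains x = false) : ∀ y, pvRoot (d.insert x x) y = pvRoot d y := by
  have hInv' : pvInv (d.insert x x) := pvInv_insert hInv le_rfl (Or.inr rfl)
  intro y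
  generalize hm : pvM (d.insert x x) y = n
  induction n using Nat.strong_induction_on generalizing y with
  | _ n IH =>
    by_cases hy : y = x
    · subst hy
      have h1 : (d.insert y y).get? y = some y := by rw [PySem.Dict.get?_insert]; simp
      rw [pvRoot_self h1, pvRoot_not_contains hc]
    · have hgy : (d.insert x x).get? y = d.get? y := by
        rw [PySem.Dict.get?_insert]; simp [hy]
      cases hg : d.get? y with
      | none => rw [pvRoot_none (hgy.trans hg), pvRoot_none hg]
      | some p =>
        by_cases hp : p = y
        · subst hp
          rw [pvRoot_self (hgy.trans hg), pvRoot_self hg]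
        · rw [pvRoot_ne hInv' (hgy.trans hg) hp, pvRoot_ne hInv hg hp]
          exact IH _ (hm ▸ pvM_lt hInv' (hgy.trans hg) hp) p rfl

theorem pvRoot_insert_root {d : PySem.Dict Int Int} {x r : Int} (hInv : pvInv d)
    (hc : d.contains x = true) (hr : r = pvRoot d x) :
    ∀ y, pvRoot (d.insert x r) y = pvRoot d y := by
  have hgr : d.get? r = some r := hr ▸ pvRoot_root hInv x hc
  have hInv' : pvInv (d.insert x r) :=
    pvInv_insert hInv (hr ▸ pvRoot_le hInv x) (Or.inl (pvContains_of_get?_eq_some d hgr))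
  intro y
  generalize hm : pvM (d.insert x r) y = n
  induction n using Nat.strong_induction_on generalizing y with
  | _ n IH =>
    by_cases hy : y = x
    · subst hy
      have h1 : (d.insert y r).get? y = some r := by rw [PySem.Dict.get?_insert]; simp
      by_cases hr' : r = y
      · rw [pvRoot_self (hr' ▸ h1), ← hr, hr']
      · rw [pvRoot_ne hInv' h1 hr']
        have := IH _ (hm ▸ pvM_lt hInv' h1 hr') r rfl
        rw [this, hr, pvRoot_idem hInv]
    · have hgy : (d.insert x r).get? y = d.get? y := by
        rw [PySem.Dict.get?_insert]; simp [hy]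
      cases hg : d.get? y with
      | none => rw [pvRoot_none (hgy.trans hg), pvRoot_none hg]
      | some p =>
        by_cases hp : p = y
        · subst hp
          rw [pvRoot_self (hgy.trans hg), pvRoot_self hg]
        · rw [pvRoot_ne hInv' (hgy.trans hg) hp, pvRoot_ne hInv hg hp]
          exact IH _ (hm ▸ pvM_lt hInv' (hgy.trans hg) hp) p rfl

theorem pvRoot_insert_link {d : PySem.Dict Int Int} {a b : Int} (hInv : pvInv d)
    (ha : d.get? a = some a) (hb : d.get? b = some b) (hab : a < b) :
    ∀ y, pvRoot (d.insert b a) y = if pvRoot d y = b then a else pvRoot d y := by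
  have hInv' : pvInv (d.insert b a) :=
    pvInv_insert hInv hab.le (Or.inl (pvContains_of_get?_eq_some d ha))
  intro y
  generalize hm : pvM (d.insert b a) y = n
  induction n using Nat.strong_induction_on generalizing y with
  | _ n IH =>
    by_cases hy : y = b
    · subst hy
      have h1 : (d.insert y a).get? y = some a := by rw [PySem.Dict.get?_insert]; simp
      have hay : a ≠ y := ne_of_lt hab
      rw [pvRoot_ne hInv' h1 hay]
      have := IH _ (hm ▸ pvM_lt hInv' h1 hay) a rfl
      rw [this, pvRoot_self ha, if_neg hay, pvRoot_self hb, if_pos rfl]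
    · have hgy : (d.insert b a).get? y = d.get? y := by
        rw [PySem.Dict.get?_insert]; simp [hy]
      cases hg : d.get? y with
      | none =>
        have hyb : pvRoot d y = y := pvRoot_none hg
        rw [pvRoot_none (hgy.trans hg), hyb, if_neg hy]
      | some p =>
        by_cases hp : p = y
        · subst hp
          rw [pvRoot_self (hgy.trans hg), pvRoot_self hg, if_neg hy]
        · rw [pvRoot_ne hInv' (hgy.trans hg) hp, pvRoot_ne hInv hg hp]
          exact IH _ (hm ▸ pvM_lt hInv' (hgy.trans hg) hp) p rfl

theorem findA_spec : ∀ (f : Nat) (d : PySem.Dict Int Int) (x : Int), pvInv d → pvM d x < f →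
    (findA f d x).1 = pvRoot d x ∧
    pvInv (findA f d x).2 ∧
    (∀ y, pvRoot (findA f d x).2 y = pvRoot d y) ∧
    (∀ k, (findA f d x).2.contains k = (d.contains k || decide (k = x))) ∧
    (findA f d x).2.size = (if d.contains x then d.size else d.size + 1) := by
  intro f
  induction f with
  | zero => intro d x _ h; omega
  | succ f IH =>
    intro d x hInv hf
    by_cases hc : d.contains x = true
    · obtain ⟨px, hx⟩ : ∃ px, d.get? x = some px := by
        cases hg : d.get? x with
        | none => rw [(PySem.Dict.get?_eq_none_iff_contains d x).mp hg] at hc; cases hc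
        | some px => exact ⟨px, rfl⟩
      have hgd : d.getD x x = px := by rw [PySem.Dict.getD_eq_get?_getD, hx]; rfl
      by_cases hpx : px = x
      · have hres : findA (f + 1) d x = (x, d) := by
          simp only [findA, hc, if_true, hgd, hpx, ne_eq, not_true_eq_false, if_false]
        rw [hres]
        refine ⟨(pvRoot_self (hpx ▸ hx)).symm, hInv, fun y => rfl, fun k => ?_, by rw [if_pos hc]⟩
        by_cases hk : k = x
        · simp [hk, hc]
        · simp [hk]
      · -- recursive case
        have hcpx : d.contains px = true := (pvInv_get?_le hInv hx).2
        have hlt : pvM d px < f := by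
          have := pvM_lt hInv hx hpx
          omega
        obtain ⟨H1, H2, H3, H4, H5⟩ := IH d px hInv hlt
        have hres : findA (f + 1) d x =
            (((findA f d px).2.insert x (findA f d px).1).getD x x,
              (findA f d px).2.insert x (findA f d px).1) := by
          simp only [findA, hc, if_true, hgd, ne_eq, hpx, not_false_eq_true, if_true]
        rw [hres]
        have hcon2 : ∀ k, (findA f d px).2.contains k = d.contains k := by
          intro k
          rw [H4]
          by_cases hk : k = px
          · simp [hk, hcpx]
          · simp [hk]
        have hrootx : pvRoot (findA f d px).2 x = pvRoot d px := by
          rw [H3, pvRoot_ne hInv hx hpx]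
        have hval : ((findA f d px).2.insert x (findA f d px).1).getD x x = (findA f d px).1 := by
          rw [PySem.Dict.getD_insert]; simp
        have hInv2 : pvInv ((findA f d px).2.insert x (findA f d px).1) := by
          apply pvInv_insert H2
          · rw [H1]
            calc pvRoot d px ≤ px := pvRoot_le hInv px
              _ ≤ x := (pvInv_get?_le hInv hx).1
          · left
            have : (findA f d px).2.get? (findA f d px).1 = some (findA f d px).1 := by
              rw [H1, ← hrootx]
              exact pvRoot_root H2 x (by rw [hcon2]; exact hc)
            exact pvContains_of_get?_eq_some _ this
        have hpres : ∀ y, pvRoot ((findA f d px).2.insert x (findA f d px).1) y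
            = pvRoot d y := by
          intro y
          rw [pvRoot_insert_root H2 (by rw [hcon2]; exact hc) (by rw [H1, ← hrootx]) y, H3]
        refine ⟨?_, hInv2, hpres, ?_, ?_⟩
        · rw [hval, H1, pvRoot_ne hInv hx hpx]
        · intro k
          rw [PySem.Dict.contains_insert, hcon2]
          by_cases hk : k = x
          · simp [hk, hc]
          · simp [hk]
        · rw [PySem.Dict.size_insert, if_pos (by rw [hcon2]; exact hc), H5, if_pos hcpx,
            if_pos hc]
    · -- x not present: inserted as its own parent, no recursion
      have hc' : d.contains x = false := by
        cases h : d.contains x with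
        | true => exact absurd h hc
        | false => rfl
      have hx1 : (d.insert x x).get? x = some x := by rw [PySem.Dict.get?_insert]; simp
      have hgd : (d.insert x x).getD x x = x := by rw [PySem.Dict.getD_eq_get?_getD, hx1]; rfl
      have hres : findA (f + 1) d x = (x, d.insert x x) := by
        simp only [findA, hc', Bool.false_eq_true, if_false, hgd, ne_eq, not_true_eq_false,
          if_false]
      rw [hres]
      refine ⟨(pvRoot_not_contains hc').symm, pvInv_insert hInv le_rfl (Or.inr rfl),
        pvRoot_insert_fresh hInv hc', fun k => ?_, by rw [PySem.Dict.size_insert]⟩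
      rw [PySem.Dict.contains_insert]
      by_cases hk : k = x
      · simp [hk]
      · simp [hk]

theorem unionA_spec (d : PySem.Dict Int Int) (x y : Int) (hInv : pvInv d) :
    pvInv (unionA d x y) ∧
    (∀ k, (unionA d x y).contains k = (d.contains k || decide (k = x) || decide (k = y))) ∧
    (∀ z, pvRoot (unionA d x y) z =
      if pvRoot d x = pvRoot d y then pvRoot d z
      else if pvRoot d z = (if pvRoot d x < pvRoot d y then pvRoot d y else pvRoot d x)
        then (if pvRoot d x < pvRoot d y then pvRoot d x else pvRoot d y)
        else pvRoot d z) := by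
  obtain ⟨A1, A2, A3, A4, _⟩ :=
    findA_spec (d.size + 1) d x hInv (by have := pvM_le_size d x; omega)
  set dx := (findA (d.size + 1) d x).2 with hdx
  obtain ⟨B1, B2, B3, B4, _⟩ :=
    findA_spec (dx.size + 1) dx y A2 (by have := pvM_le_size dx y; omega)
  set dy := (findA (dx.size + 1) dx y).2 with hdy
  have hpx : (findA (d.size + 1) d x).1 = pvRoot d x := A1
  have hpy : (findA (dx.size + 1) dx y).1 = pvRoot d y := by rw [B1, A3]
  have hry : ∀ z, pvRoot dy z = pvRoot d z := fun z => by rw [B3, A3]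
  have hcy : ∀ k, dy.contains k = (d.contains k || decide (k = x) || decide (k = y)) := by
    intro k; rw [B4, A4]
  have hcyx : dy.contains x = true := by rw [hcy]; simp
  have hcyy : dy.contains y = true := by rw [hcy]; simp
  have hgx : dy.get? (pvRoot d x) = some (pvRoot d x) := by
    have := pvRoot_root B2 x hcyx
    rwa [hry x] at this
  have hgy : dy.get? (pvRoot d y) = some (pvRoot d y) := by
    have := pvRoot_root B2 y hcyy
    rwa [hry y] at this
  have hu : unionA d x y =
      (if pvRoot d x ≠ pvRoot d y then
        (if pvRoot d x < pvRoot d y then dy.insert (pvRoot d y) (pvRoot d x)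
          else dy.insert (pvRoot d x) (pvRoot d y))
        else dy) := by
    simp only [unionA, ← hdx, ← hdy, hpx, hpy]
  have hroot_cont : ∀ w, d.contains (pvRoot d w) = true ∨ pvRoot d w = w :=
    pvRoot_contains_or_eq hInv
  by_cases heq : pvRoot d x = pvRoot d y
  · rw [hu, if_neg (by simp [heq])]
    refine ⟨B2, hcy, fun z => ?_⟩
    rw [if_pos heq, hry]
  · rw [hu, if_pos heq]
    by_cases hlt : pvRoot d x < pvRoot d y
    · rw [if_pos hlt]
      refine ⟨pvInv_insert B2 hlt.le (Or.inl (pvContains_of_get?_eq_some _ hgx)),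
        fun k => ?_, fun z => ?_⟩
      · rw [PySem.Dict.contains_insert, hcy]
        by_cases hk : k = pvRoot d y
        · have hr : (d.contains k || decide (k = x) || decide (k = y)) = true := by
            rcases hroot_cont y with h | h
            · rw [hk]; simp [h]
            · have : k = y := hk.trans h; simp [this]
          rw [hr]
          simp [hk]
        · simp [hk]
      · rw [pvRoot_insert_link B2 hgx hgy hlt z, hry z]
        simp [heq, hlt]
    · have hgt : pvRoot d y < pvRoot d x := by
        rcases lt_trichotomy (pvRoot d x) (pvRoot d y) with h | h | h
        · exact absurd h hlt
        · exact absurd h heq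
        · exact h
      rw [if_neg hlt]
      refine ⟨pvInv_insert B2 hgt.le (Or.inl (pvContains_of_get?_eq_some _ hgy)),
        fun k => ?_, fun z => ?_⟩
      · rw [PySem.Dict.contains_insert, hcy]
        by_cases hk : k = pvRoot d x
        · have hr : (d.contains k || decide (k = x) || decide (k = y)) = true := by
            rcases hroot_cont x with h | h
            · rw [hk]; simp [h]
            · have : k = x := hk.trans h; simp [this]
          rw [hr]
          simp [hk]
        · simp [hk]
      · rw [pvRoot_insert_link B2 hgy hgx hgt z, hry z]
        simp [heq, hlt]

-- ----- B-side lemmas -----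

theorem keys_relabelB (lo hi : Int) (r : PySem.Dict Int Int) :
    (relabelB lo hi r).keys = r.keys := by
  simp only [relabelB, PySem.Dict.keys, List.map_map]
  congr 1
  funext p
  by_cases h : p.2 = hi
  · simp [h]
  · simp [h]

theorem contains_relabelB (lo hi : Int) (r : PySem.Dict Int Int) (k : Int) :
    (relabelB lo hi r).contains k = r.contains k := by
  rw [PySem.Dict.contains_eq_decide_mem_keys, PySem.Dict.contains_eq_decide_mem_keys,
    keys_relabelB]

theorem getD_relabelB_mem (lo hi : Int) {r : PySem.Dict Int Int} (hnd : r.keys.Nodup)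
    {z v : Int} (hz : r.get? z = some v) :
    (relabelB lo hi r).getD z z = if v = hi then lo else v := by
  have hmem : (z, v) ∈ r.items := PySem.Dict.mem_items_of_get?_eq_some r hz
  have hnd' : (relabelB lo hi r).keys.Nodup := by rw [keys_relabelB]; exact hnd
  have hmem' : (z, if v = hi then lo else v) ∈ (relabelB lo hi r).items := by
    simp only [relabelB]
    apply List.mem_map.mpr
    refine ⟨(z, v), hmem, ?_⟩
    by_cases h : v = hi
    · simp [h]
    · simp [h]
  exact PySem.Dict.getD_of_mem_items _ hmem' hnd' z

theorem getD_relabelB_not (lo hi : Int) {r : PySem.Dict Int Int} {z : Int}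
    (hz : r.contains z = false) : (relabelB lo hi r).getD z z = z :=
  PySem.Dict.getD_of_not_contains _ z (by rw [contains_relabelB]; exact hz)

-- setdefault with the current value (or the key itself) changes no lookups
theorem setdefault_self_spec (r : PySem.Dict Int Int) (hnd : r.keys.Nodup) (g : Int) :
    (r.setdefault g (r.getD g g)).keys.Nodup ∧
    (∀ z, (r.setdefault g (r.getD g g)).getD z z = r.getD z z) ∧
    (∀ k, (r.setdefault g (r.getD g g)).contains k = (r.contains k || decide (k = g))) := by
  cases hc : r.contains g with
  | true =>
    rw [PySem.Dict.setdefault_of_contains r _ hc]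
    refine ⟨hnd, fun z => rfl, fun k => ?_⟩
    by_cases hk : k = g
    · simp [hk, hc]
    · simp [hk]
  | false =>
    have hd : r.getD g g = g := PySem.Dict.getD_of_not_contains r g hc
    rw [PySem.Dict.setdefault_of_not_contains r _ hc, hd]
    refine ⟨PySem.Dict.nodup_keys_insert r g g hnd, fun z => ?_, fun k => ?_⟩
    · rw [PySem.Dict.getD_insert]
      by_cases hz : z = g
      · rw [if_pos hz, hz, hd]
      · rw [if_neg hz]
    · rw [PySem.Dict.contains_insert]
      by_cases hk : k = g
      · simp [hk]
      · simp [hk]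

-- the simulation relation: r is the flat picture of A's parent forest d
def pvRel (d r : PySem.Dict Int Int) : Prop :=
  pvInv d ∧ r.keys.Nodup ∧ (∀ z, r.getD z z = pvRoot d z) ∧ (∀ k, r.contains k = d.contains k)

theorem pvRel_empty : pvRel PySem.Dict.empty PySem.Dict.empty := by
  refine ⟨pvInv_empty, PySem.Dict.nodup_keys_empty, fun z => ?_, fun k => rfl⟩
  rw [PySem.Dict.getD_eq_get?_getD, PySem.Dict.get?_empty,
    pvRoot_none (PySem.Dict.get?_empty z)]
  rfl

theorem stepB_rel {d r : PySem.Dict Int Int} (p : Int × Int × Int) (h : pvRel d r) :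
    pvRel (unionA d p.1 p.2.1) (stepB r p) := by
  obtain ⟨hInv, hnd, hget, hcon⟩ := h
  obtain ⟨hInv', hcon', hroot'⟩ := unionA_spec d p.1 p.2.1 hInv
  have hr1 : r.getD p.1 p.1 = pvRoot d p.1 := hget p.1
  have hr2 : r.getD p.2.1 p.2.1 = pvRoot d p.2.1 := hget p.2.1
  -- the two setdefaults
  obtain ⟨s1nd, s1get, s1con⟩ := setdefault_self_spec r hnd p.1
  have hv2 : r.getD p.2.1 p.2.1 = (r.setdefault p.1 (r.getD p.1 p.1)).getD p.2.1 p.2.1 :=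
    (s1get p.2.1).symm
  obtain ⟨s2nd, s2get, s2con⟩ :=
    setdefault_self_spec (r.setdefault p.1 (r.getD p.1 p.1)) s1nd p.2.1
  set s2 := (r.setdefault p.1 (r.getD p.1 p.1)).setdefault p.2.1
      ((r.setdefault p.1 (r.getD p.1 p.1)).getD p.2.1 p.2.1) with hs2
  have hs2' : (r.setdefault p.1 (r.getD p.1 p.1)).setdefault p.2.1 (r.getD p.2.1 p.2.1) = s2 := by
    rw [hs2, ← hv2]
  have s2get' : ∀ z, s2.getD z z = pvRoot d z := by
    intro z; rw [s2get, s1get, hget]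
  have s2con' : ∀ k, s2.contains k =
      (d.contains k || decide (k = p.1) || decide (k = p.2.1)) := by
    intro k; rw [s2con, s1con, hcon]
  have hstep : stepB r p =
      (if r.getD p.1 p.1 ≠ r.getD p.2.1 p.2.1 then
        relabelB (if r.getD p.1 p.1 < r.getD p.2.1 p.2.1 then r.getD p.1 p.1 else r.getD p.2.1 p.2.1)
          (if r.getD p.1 p.1 < r.getD p.2.1 p.2.1 then r.getD p.2.1 p.2.1 else r.getD p.1 p.1) s2
      else s2) := by
    simp only [stepB, hs2']
  by_cases heq : r.getD p.1 p.1 = r.getD p.2.1 p.2.1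
  · rw [hstep, if_neg (by simp [heq])]
    have heq' : pvRoot d p.1 = pvRoot d p.2.1 := by rw [← hr1, ← hr2, heq]
    refine ⟨hInv', s2nd, fun z => ?_, fun k => ?_⟩
    · rw [s2get' z, hroot' z, if_pos heq']
    · rw [s2con' k, hcon' k]
  · rw [hstep, if_pos heq]
    have heq' : ¬ pvRoot d p.1 = pvRoot d p.2.1 := by rw [← hr1, ← hr2]; exact heq
    refine ⟨hInv', by rw [keys_relabelB]; exact s2nd, fun z => ?_, fun k => ?_⟩
    · rw [hroot' z, if_neg heq', ← hr1, ← hr2]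
      cases hcz : s2.contains z with
      | true =>
        obtain ⟨v, hv⟩ : ∃ v, s2.get? z = some v := by
          cases hg : s2.get? z with
          | none => rw [(PySem.Dict.get?_eq_none_iff_contains s2 z).mp hg] at hcz; cases hcz
          | some v => exact ⟨v, rfl⟩
        have hvz : v = pvRoot d z := by
          have := s2get' z
          rw [PySem.Dict.getD_eq_get?_getD, hv] at this
          exact this
        rw [getD_relabelB_mem _ _ s2nd hv, hvz, hr1, hr2]
      | false =>
        rw [getD_relabelB_not _ _ hcz]
        -- z is not a stored node, so its root is itself and differs from both class labels
        have hfz : (d.contains z || decide (z = p.1) || decide (z = p.2.1)) = false := by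
          rw [← s2con' z, hcz]
        simp only [Bool.or_eq_false_iff, decide_eq_false_iff_not] at hfz
        have hdz : d.contains z = false := hfz.1.1
        have hzz : pvRoot d z = z := pvRoot_not_contains hdz
        have hne1 : z ≠ r.getD p.1 p.1 := by
          rw [hr1]
          rcases pvRoot_contains_or_eq hInv p.1 with h | h
          · intro hzeq
            rw [← hzeq] at h
            rw [h] at hdz
            cases hdz
          · rw [h]; exact hfz.1.2
        have hne2 : z ≠ r.getD p.2.1 p.2.1 := by
          rw [hr2]
          rcases pvRoot_contains_or_eq hInv p.2.1 with h | h
          · intro hzeq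
            rw [← hzeq] at h
            rw [h] at hdz
            cases hdz
          · rw [h]; exact hfz.2
        rw [hzz]
        by_cases hlt : r.getD p.1 p.1 < r.getD p.2.1 p.2.1
        · rw [if_pos hlt, if_neg hne2]
        · rw [if_neg hlt, if_neg hne1]
    · rw [contains_relabelB, s2con' k, hcon' k]

theorem phase1_rel : ∀ (l : List (Int × Int × Int)) (d r : PySem.Dict Int Int), pvRel d r →
    pvRel (l.foldl (fun d p => unionA d p.1 p.2.1) d) (l.foldl stepB r) := by
  intro l
  induction l with
  | nil => intro d r h; exact h
  | cons p t IH =>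
    intro d r h
    exact IH _ _ (stepB_rel p h)

theorem phase2_eq (lab : PySem.Dict Int Int) :
    ∀ (l : List (Int × Int × Int)) (out d : PySem.Dict Int Int),
      pvInv d → (∀ z, pvRoot d z = lab.getD z z) →
      (l.foldl stepA2 (out, d)).1 = l.foldl (outStepB lab) out := by
  intro l
  induction l with
  | nil => intro out d _ _; rfl
  | cons p t IH =>
    intro out d hInv hroots
    obtain ⟨F1, F2, F3, _, _⟩ :=
      findA_spec (d.size + 1) d p.1 hInv (by have := pvM_le_size d p.1; omega)
    set d1 := (findA (d.size + 1) d p.1).2 with hd1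
    obtain ⟨G1, G2, G3, _, _⟩ :=
      findA_spec (d1.size + 1) d1 p.2.1 F2 (by have := pvM_le_size d1 p.2.1; omega)
    set d2 := (findA (d1.size + 1) d1 p.2.1).2 with hd2
    have hv1 : (findA (d.size + 1) d p.1).1 = lab.getD p.1 p.1 := by
      rw [F1, hroots]
    have hv2 : (findA (d1.size + 1) d1 p.2.1).1 = lab.getD p.2.1 p.2.1 := by
      rw [G1, F3, hroots]
    have hstep : stepA2 (out, d) p =
        (outStepB lab out p, d2) := by
      simp only [stepA2, outStepB, ← hd1, ← hd2, hv1, hv2]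
    rw [List.foldl_cons, List.foldl_cons, hstep]
    apply IH
    · exact G2
    · intro z
      rw [G3, F3, hroots]

-- ===== VERDICT (by name: the statement is the Claim_ definition above) =====
theorem build_merge_map_spec : Claim_equal_build_merge_map := by
  intro pairs _
  show build_merge_map pairs = build_merge_map_alt pairs
  have hrel := phase1_rel pairs PySem.Dict.empty PySem.Dict.empty pvRel_empty
  have hI := hrel.1
  have hz := fun z => (hrel.2.2.1 z).symm
  have h2 := phase2_eq (pairs.foldl stepB PySem.Dict.empty) pairs PySem.Dict.empty _ hI hz
  simp only [build_merge_map, build_merge_map_alt]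
  rw [h2]
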